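-- pv_equiv track=rewrite | github.com/RAIK283H/pathfinding-code-cdelzell | permutation.py | getLargestMobile
-- ===== SOURCE A (Python) =====
-- def getLargestMobile(arr):
--     maxMobile = -1000
--     maxIndex = -100
--     swapIndex = -100
--     for i in range(len(arr)):
--         if (arr[i] > 0 and i != 0):
--             if(abs(arr[i]) - abs(arr[i - 1]) > 0 and abs(arr[i]) > maxMobile):
--                 maxMobile, maxIndex, swapIndex = getMaxAndSwap(arr, i, False)
--         if (arr[i] < 0 and i != len(arr) - 1):
--             if(abs(arr[i]) - abs(arr[i + 1]) > 0 and abs(arr[i]) > maxMobile):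
--                 maxMobile, maxIndex, swapIndex = getMaxAndSwap(arr, i, True)
--
--     return maxIndex, swapIndex
--
-- def getMaxAndSwap(arr, i, positive):
--     maxMobile = abs(arr[i])
--     maxIndex = i
--     if(positive):
--         swapIndex = i+1
--     else:
--         swapIndex = i-1
--
--     return maxMobile, maxIndex, swapIndex
-- ===== SOURCE B (Python) =====
-- def getLargestMobile(arr):
--     n = len(arr)
--
--     def mobile(i):
--         v = arr[i]
--         if v > 0 and i != 0 and abs(v) > abs(arr[i - 1]):
--             return i - 1
--         if v < 0 and i != n - 1 and abs(v) > abs(arr[i + 1]):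
--             return i + 1
--         return None
--
--     for i in sorted(range(n), key=lambda j: -abs(arr[j])):
--         s = mobile(i)
--         if s is not None:
--             return (i, s)
--     return (-100, -100)
-- ===== Notes on version B (the rewrite author's own statement) =====
-- stated objective: alternative
-- what changed: B stably sorts the indices by descending absolute value and returns the first index in that order that is mobile (sort-then-scan), replacing A's single running-max accumulator pass and its getMaxAndSwap helper; the stable sort preserves A's earliest-index tie-breaking.
import Mathlib
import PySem

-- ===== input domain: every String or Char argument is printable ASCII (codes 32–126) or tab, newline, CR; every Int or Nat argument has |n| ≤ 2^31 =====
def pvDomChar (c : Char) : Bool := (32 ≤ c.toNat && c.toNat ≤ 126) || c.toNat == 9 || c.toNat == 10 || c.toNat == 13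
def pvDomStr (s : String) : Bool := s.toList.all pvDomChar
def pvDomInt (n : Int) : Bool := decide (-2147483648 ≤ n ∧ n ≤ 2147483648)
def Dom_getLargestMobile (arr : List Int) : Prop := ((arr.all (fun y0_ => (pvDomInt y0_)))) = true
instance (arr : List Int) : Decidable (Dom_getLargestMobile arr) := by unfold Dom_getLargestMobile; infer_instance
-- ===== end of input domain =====

-- B stably sorts the indices by descending absolute value and returns the first mobile
-- index in that order (sort-then-scan), instead of A's running-max accumulator pass.

-- ===== PORT A =====
def getMaxAndSwap (arr : List Int) (i : Int) (positive : Bool) : Int × Int × Int :=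
  let maxMobile := |PySem.List.pyGetD arr i 0|
  let maxIndex := i
  let swapIndex := if positive then i + 1 else i - 1
  (maxMobile, maxIndex, swapIndex)

def getLargestMobile (arr : List Int) : Int × Int :=
  let n : Int := arr.length
  let st :=
    (PySem.List.pyRange 0 n 1).foldl (fun (st : Int × Int × Int) i =>
      let ai := PySem.List.pyGetD arr i 0
      let st1 :=
        if ai > 0 ∧ i ≠ 0 then
          if |ai| - |PySem.List.pyGetD arr (i - 1) 0| > 0 ∧ |ai| > st.1 then
            getMaxAndSwap arr i false
          else st
        else st
      if ai < 0 ∧ i ≠ n - 1 then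
        if |ai| - |PySem.List.pyGetD arr (i + 1) 0| > 0 ∧ |ai| > st1.1 then
          getMaxAndSwap arr i true
        else st1
      else st1)
    ((-1000 : Int), (-100 : Int), (-100 : Int))
  (st.2.1, st.2.2)

-- ===== PORT B =====
-- Source B's helper mobile(i): the swap index if i is mobile, none otherwise
def mobSwap (arr : List Int) (n i : Int) : Option Int :=
  let v := PySem.List.pyGetD arr i 0
  if v > 0 ∧ i ≠ 0 ∧ |v| > |PySem.List.pyGetD arr (i - 1) 0| then some (i - 1)
  else if v < 0 ∧ i ≠ n - 1 ∧ |v| > |PySem.List.pyGetD arr (i + 1) 0| then some (i + 1)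
  else none

-- Source B's for loop with its early return
def pvScan (arr : List Int) (n : Int) : List Int → Int × Int
  | [] => (-100, -100)
  | i :: t =>
    match mobSwap arr n i with
    | some s => (i, s)
    | none => pvScan arr n t

def getLargestMobile_alt (arr : List Int) : Int × Int :=
  let n : Int := arr.length
  pvScan arr n
    (PySem.List.sorted (PySem.List.pyRange 0 n 1) (fun j => -|PySem.List.pyGetD arr j 0|) false)

-- ===== PRECONDITION & SPEC =====
def Spec_getLargestMobile (arr : List Int) (out : Int × Int) : Prop := out = getLargestMobile_alt arr
instance (arr : List Int) (out : Int × Int) : Decidable (Spec_getLargestMobile arr out) := by unfold Spec_getLargestMobile; infer_instance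

-- ===== CLAIM (what is proved, stated in full; the proofs are below) =====
def Claim_equal_getLargestMobile : Prop := ∀ (arr : List Int), Dom_getLargestMobile arr → Spec_getLargestMobile arr (getLargestMobile arr)

-- ===== LEMMAS AND PROOFS =====

-- the 0/1-element candidate list contributed by index i (A-side bookkeeping)
def pvCand (arr : List Int) (n i : Int) : List (Int × Int × Int) :=
  match mobSwap arr n i with
  | some s => [(|PySem.List.pyGetD arr i 0|, i, s)]
  | none => []

-- running-max update, as A performs it
def pvUpd (st c : Int × Int × Int) : Int × Int × Int := if c.1 > st.1 then c else st

-- (index, swap) pair of a mobile index, as B returns it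
def pvG (arr : List Int) (n i : Int) : Option (Int × Int) :=
  (mobSwap arr n i).map (fun s => (i, s))

-- A's loop body = folding pvUpd over the candidate list of that index
lemma pvStepA (arr : List Int) (n i : Int) (st : Int × Int × Int) :
    (let ai := PySem.List.pyGetD arr i 0
     let st1 :=
       if ai > 0 ∧ i ≠ 0 then
         if |ai| - |PySem.List.pyGetD arr (i - 1) 0| > 0 ∧ |ai| > st.1 then
           getMaxAndSwap arr i false
         else st
       else st
     if ai < 0 ∧ i ≠ n - 1 then
       if |ai| - |PySem.List.pyGetD arr (i + 1) 0| > 0 ∧ |ai| > st1.1 then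
         getMaxAndSwap arr i true
       else st1
     else st1) = (pvCand arr n i).foldl pvUpd st := by
  simp only [pvCand, mobSwap, getMaxAndSwap]
  split_ifs <;> simp only [List.foldl, pvUpd] <;> (try split_ifs) <;>
    first | rfl | (exfalso; simp_all)

-- A's whole fold = folding pvUpd over each index's candidates
lemma pvFoldA (arr : List Int) (n : Int) (l : List Int) (st : Int × Int × Int) :
    l.foldl (fun (st : Int × Int × Int) i =>
      let ai := PySem.List.pyGetD arr i 0
      let st1 :=
        if ai > 0 ∧ i ≠ 0 then
          if |ai| - |PySem.List.pyGetD arr (i - 1) 0| > 0 ∧ |ai| > st.1 then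
            getMaxAndSwap arr i false
          else st
        else st
      if ai < 0 ∧ i ≠ n - 1 then
        if |ai| - |PySem.List.pyGetD arr (i + 1) 0| > 0 ∧ |ai| > st1.1 then
          getMaxAndSwap arr i true
        else st1
      else st1) st
    = l.foldl (fun st i => (pvCand arr n i).foldl pvUpd st) st := by
  induction l generalizing st with
  | nil => rfl
  | cons i t ih => simp only [List.foldl_cons]; rw [← pvStepA arr n i st, ih]

-- non-mobile indices contribute nothing to A's fold
lemma pvFoldFilter (arr : List Int) (n : Int) (l : List Int) (st : Int × Int × Int) :
    l.foldl (fun st i => (pvCand arr n i).foldl pvUpd st) st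
    = (l.filter (fun i => (mobSwap arr n i).isSome)).foldl
        (fun st i => (pvCand arr n i).foldl pvUpd st) st := by
  induction l generalizing st with
  | nil => rfl
  | cons i t ih =>
    cases h : mobSwap arr n i with
    | none =>
      have hc : pvCand arr n i = [] := by simp [pvCand, h]
      simp only [List.foldl_cons, List.filter_cons, h, Option.isSome_none,
        Bool.false_eq_true, if_false, hc, List.foldl_nil]
      exact ih st
    | some s =>
      simp only [List.foldl_cons, List.filter_cons, h, Option.isSome_some, if_true]
      exact ih _

-- B's scan = the first index whose pvG is some
lemma pvScan_eq (arr : List Int) (n : Int) (l : List Int) :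
    pvScan arr n l = match l.findSome? (pvG arr n) with
      | none => (-100, -100)
      | some p => p := by
  induction l with
  | nil => rfl
  | cons i t ih =>
    simp only [pvScan, List.findSome?_cons, pvG]
    cases h : mobSwap arr n i <;> simp [ih]

-- findSome? ignores indices whose pvG is none
lemma pvFind_filter (arr : List Int) (n : Int) (l : List Int) :
    l.findSome? (pvG arr n)
    = (l.filter (fun i => (mobSwap arr n i).isSome)).findSome? (pvG arr n) := by
  induction l with
  | nil => rfl
  | cons i t ih =>
    simp only [List.findSome?_cons, List.filter_cons, pvG]
    cases h : mobSwap arr n i <;> simp [h, pvG, ih]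

-- filtering commutes with one insertion step of the stable sort, on a key-sorted list
lemma pvFilter_insertBy (key : Int → Int) (p : Int → Bool) (x : Int) (ys : List Int)
    (hys : ys.Pairwise (fun a b => key a ≤ key b)) :
    (PySem.List.insertBy (fun a b => decide (key a < key b)) x ys).filter p
    = if p x then PySem.List.insertBy (fun a b => decide (key a < key b)) x (ys.filter p)
      else ys.filter p := by
  induction ys with
  | nil => cases hpx : p x <;> simp [PySem.List.insertBy, hpx]
  | cons y t ih =>
    have hyt : ∀ z ∈ t, key y ≤ key z := (List.pairwise_cons.mp hys).1
    have ht := (List.pairwise_cons.mp hys).2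
    by_cases hb : key x < key y
    · simp only [PySem.List.insertBy, hb, decide_true, if_true]
      cases hpx : p x with
      | false => simp [List.filter_cons, hpx]
      | true =>
        have hhead : ∀ z ∈ List.filter p (y :: t), key x < key z := by
          intro z hz
          rcases List.mem_cons.mp (List.mem_of_mem_filter hz) with rfl | hzt
          · exact hb
          · exact lt_of_lt_of_le hb (hyt z hzt)
        cases hf : List.filter p (y :: t) with
        | nil => simp [hpx, hf, PySem.List.insertBy]
        | cons z l =>
          have hz : key x < key z := hhead z (by rw [hf]; simp)
          simp [hpx, hf, PySem.List.insertBy, hz]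
    · simp only [PySem.List.insertBy, hb, decide_false, Bool.false_eq_true, if_false]
      cases hpy : p y with
      | true =>
        cases hpx : p x with
        | true =>
          simp [hpy, hpx, ih ht, PySem.List.insertBy, hb]
        | false =>
          simp [hpy, hpx, ih ht]
      | false =>
        cases hpx : p x with
        | true => simp [hpy, hpx, ih ht]
        | false => simp [hpy, hpx, ih ht]

-- filtering commutes with the stable sort
lemma pvFilter_sorted (key : Int → Int) (p : Int → Bool) (l : List Int) :
    (PySem.List.sorted l key false).filter p = PySem.List.sorted (l.filter p) key false := by
  induction l using List.reverseRecOn with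
  | nil => rfl
  | append_singleton l x ih =>
    have happ : ∀ (m : List Int),
        PySem.List.sorted (m ++ [x]) key false
        = PySem.List.insertBy (fun a b => decide (key a < key b)) x
            (PySem.List.sorted m key false) := by
      intro m
      rw [PySem.List.sorted_eq_foldl_insertBy, PySem.List.sorted_eq_foldl_insertBy,
        List.foldl_append, List.foldl_cons, List.foldl_nil]
    rw [happ, pvFilter_insertBy key p x _ (PySem.List.sorted_pairwise l key), ih,
      List.filter_append]
    cases hpx : p x with
    | true => simp only [hpx, if_true, List.filter_cons, List.filter_nil, happ]
    | false => simp only [hpx, Bool.false_eq_true, if_false, List.filter_cons,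
        List.filter_nil, List.append_nil]

-- main bridge: on a list of mobile indices, A's running max = head of the stable sort
lemma pvMain (arr : List Int) (n : Int) (ms : List Int)
    (h : ∀ i ∈ ms, (mobSwap arr n i).isSome = true) :
    ms.foldl (fun st i => (pvCand arr n i).foldl pvUpd st)
        ((-1000 : Int), (-100 : Int), (-100 : Int))
    = match (PySem.List.sorted ms (fun j => -|PySem.List.pyGetD arr j 0|) false).findSome?
          (pvG arr n) with
      | none => ((-1000 : Int), (-100 : Int), (-100 : Int))
      | some (i, s) => (|PySem.List.pyGetD arr i 0|, i, s) := by
  induction ms using List.reverseRecOn with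
  | nil => rfl
  | append_singleton ms x ih =>
    have hx : (mobSwap arr n x).isSome = true := h x (by simp)
    obtain ⟨sx, hsx⟩ := Option.isSome_iff_exists.mp hx
    have hms : ∀ i ∈ ms, (mobSwap arr n i).isSome = true := fun i hi => h i (by simp [hi])
    have hsorted : PySem.List.sorted (ms ++ [x]) (fun j => -|PySem.List.pyGetD arr j 0|) false
        = PySem.List.insertBy
            (fun a b => decide ((-|PySem.List.pyGetD arr a 0|) < (-|PySem.List.pyGetD arr b 0|)))
            x (PySem.List.sorted ms (fun j => -|PySem.List.pyGetD arr j 0|) false) := by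
      rw [PySem.List.sorted_eq_foldl_insertBy, PySem.List.sorted_eq_foldl_insertBy,
        List.foldl_append, List.foldl_cons, List.foldl_nil]
    rw [List.foldl_append, List.foldl_cons, List.foldl_nil, ih hms, hsorted]
    simp only [pvCand, hsx, List.foldl_cons, List.foldl_nil]
    cases hs : PySem.List.sorted ms (fun j => -|PySem.List.pyGetD arr j 0|) false with
    | nil =>
      have hmsnil : ms = [] := (PySem.List.sorted_eq_nil_iff _ _ _).mp hs
      subst hmsnil
      simp only [List.findSome?_nil, PySem.List.insertBy, List.findSome?_cons, pvG, hsx,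
        Option.map_some]
      have hpos : 0 ≤ |PySem.List.pyGetD arr x 0| := abs_nonneg _
      simp only [pvUpd]
      rw [if_pos (by omega)]
    | cons hd tl =>
      have hhd : hd ∈ ms := by
        have := (PySem.List.mem_sorted (x := hd)
          (xs := ms) (key := fun j => -|PySem.List.pyGetD arr j 0|) (rev := false)).mp
          (by rw [hs]; simp)
        exact this
      obtain ⟨sh, hsh⟩ := Option.isSome_iff_exists.mp (hms hd hhd)
      simp only [List.findSome?_cons, pvG, hsh, Option.map_some, PySem.List.insertBy]
      by_cases hb : (-|PySem.List.pyGetD arr x 0|) < (-|PySem.List.pyGetD arr hd 0|)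
      · simp only [hb, decide_true, if_true, List.findSome?_cons, pvG, hsx, Option.map_some]
        simp only [pvUpd]
        rw [if_pos (by omega)]
      · simp only [hb, decide_false, Bool.false_eq_true, if_false, List.findSome?_cons,
          pvG, hsh, Option.map_some]
        simp only [pvUpd]
        rw [if_neg (by omega)]

-- ===== VERDICT (by name: the statement is the Claim_ definition above) =====
theorem getLargestMobile_spec : Claim_equal_getLargestMobile := by
  intro arr _
  unfold Spec_getLargestMobile getLargestMobile getLargestMobile_alt
  simp only []
  rw [pvFoldA arr (arr.length : Int), pvFoldFilter, pvScan_eq, pvFind_filter,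
    pvFilter_sorted (fun j => -|PySem.List.pyGetD arr j 0|)
      (fun i => (mobSwap arr (arr.length : Int) i).isSome)]
  rw [pvMain arr (arr.length : Int)
    ((PySem.List.pyRange 0 (arr.length : Int) 1).filter
      (fun i => (mobSwap arr (arr.length : Int) i).isSome))
    (by intro i hi; exact (List.mem_filter.mp hi).2)]
  cases hf : (PySem.List.sorted
      ((PySem.List.pyRange 0 (arr.length : Int) 1).filter
        (fun i => (mobSwap arr (arr.length : Int) i).isSome))
      (fun j => -|PySem.List.pyGetD arr j 0|) false).findSome?
      (pvG arr (arr.length : Int)) with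
  | none => rfl
  | some p => cases p; rfl
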